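-- pv_equiv track=rewrite | github.com/qldrh112/algorithm | swea/5948.py | solution
-- ===== SOURCE A (Python) =====
-- import heapq
--
-- def solution(nums):
--     def combination(n, r, k, comb):
--         if r == k:
--             sum_num = sum([nums[elem] for elem in comb])
--             # 중복되는 값은 추가하지 않는다.
--             if sum_num not in sums_set:
--                 sums_set.add(sum_num)
--                 # 힙의 크기는 5로 유지
--                 if len(heap) < 5:
--                     heapq.heappush(heap, sum_num)
--                 else:
--                     heapq.heappushpop(heap, sum_num)
--         else:
--             for i in range(comb[k-1] + 1, n):
--                 comb[k] = i
--                 combination(n, r, k+1, comb)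
--     heap = []
--     sums_set = set()
--     combination(7, 3, 0, [-1] * 3)
--     return heap[0]
-- ===== SOURCE B (Python) =====
-- from itertools import combinations
--
-- def solution(nums):
--     sums = {sum(nums[i] for i in t) for t in combinations(range(7), 3)}
--     desc = sorted(sums, reverse=True)
--     return desc[4] if len(desc) >= 5 else desc[-1]
-- ===== Notes on version B (the rewrite author's own statement) =====
-- stated objective: simpler
-- what changed: Replaces A's recursive index-triple enumeration feeding a deduplicating size-5 min-heap by a direct comprehension over itertools.combinations collecting the distinct sums into a set, then one descending sort and an index (5th largest, or the minimum when fewer than 5 distinct sums exist).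
import Mathlib
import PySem

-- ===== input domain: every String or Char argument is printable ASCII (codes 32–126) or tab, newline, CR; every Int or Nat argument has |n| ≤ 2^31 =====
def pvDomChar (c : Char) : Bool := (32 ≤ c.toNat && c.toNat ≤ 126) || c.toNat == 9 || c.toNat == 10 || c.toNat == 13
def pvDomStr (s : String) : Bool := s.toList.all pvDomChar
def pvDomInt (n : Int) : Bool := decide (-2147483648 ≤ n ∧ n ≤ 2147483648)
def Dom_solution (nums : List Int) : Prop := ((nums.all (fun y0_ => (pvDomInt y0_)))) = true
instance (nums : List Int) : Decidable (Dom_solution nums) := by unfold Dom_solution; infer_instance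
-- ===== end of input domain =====

-- B replaces A's recursive triple enumeration with a bounded min-heap by enumerate-all-sums, dedupe, sort
-- descending and index (objective: simpler). Equivalence of the RETURN value is proved on Pre_solution.

-- ===== PORT A =====
-- hand port of heapq (PySem has no heap): the heap list is kept ascending-sorted, which realises exactly the
-- interface A observes — heappush adds an element, heappushpop adds then removes the minimum, heap[0] is the
-- minimum, len is the size.  Exact for A's return value, which reads the heap only through heap[0] and len(heap).
def heapPush : List Int → Int → List Int
  | [], x => [x]
  | h :: t, x => if x ≤ h then x :: h :: t else h :: heapPush t x

def heapPushPop (heap : List Int) (x : Int) : List Int :=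
  match heap with
  | [] => heap
  | h :: t => if h < x then heapPush t x else heap

-- 'combination(n, r, k, comb)' with the (heap, sums_set) state threaded; fuel = number of remaining recursion
-- levels (a totality device only: 4 levels suffice for the call combination(7,3,0,·)); comb is passed by value,
-- which is exact because a call only reads comb[k-1] (set by its caller) and writes comb[k].
def combRec (nums : List Int) : Nat → Int → Int → Int → List Int → List Int × PySem.Set Int → List Int × PySem.Set Int
  | 0, _, _, _, _, st => st
  | fuel+1, n, r, k, comb, st =>
    if r = k then
      let s := (comb.map (fun e => (PySem.List.pyGet? nums e).getD 0)).sum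
      if s ∈ st.2 then st
      else
        (if st.1.length < 5 then heapPush st.1 s else heapPushPop st.1 s, PySem.Set.add st.2 s)
    else
      (PySem.List.pyRange ((PySem.List.pyGet? comb (k-1)).getD 0 + 1) n 1).foldl
        (fun st i => combRec nums fuel n r (k+1) (comb.set k.toNat i) st) st

def solution (nums : List Int) : Int :=
  (PySem.List.pyGet? (combRec nums 4 7 3 0 [-1, -1, -1] ([], PySem.Set.empty)).1 0).getD 0

-- ===== PORT B =====
def solution_alt (nums : List Int) : Int :=
  let sums := (PySem.List.combinations (PySem.List.pyRange 0 7 1) 3).map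
      (fun t => (t.map (fun i => (PySem.List.pyGet? nums i).getD 0)).sum)
  let dset := PySem.Set.ofList sums
  let desc := PySem.List.sorted dset (fun x => x) true
  if 5 ≤ desc.length then (PySem.List.pyGet? desc 4).getD 0 else (PySem.List.pyGet? desc (-1)).getD 0

-- ===== PRECONDITION & SPEC =====
-- Pre_ excludes nums of length < 7, on which Python A (and B) raise IndexError.
def Pre_solution (nums : List Int) : Prop := 7 ≤ nums.length
instance (nums : List Int) : Decidable (Pre_solution nums) := by unfold Pre_solution; infer_instance
def pvWitness_solution : List Int := [3, -1, 4, 1, -5, 9, 2]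

def Spec_solution (nums : List Int) (out : Int) : Prop := out = solution_alt nums
instance (nums : List Int) (out : Int) : Decidable (Spec_solution nums out) := by unfold Spec_solution; infer_instance

-- ===== CLAIM (what is proved, stated in full; the proofs are below) =====
def Claim_equal_solution : Prop := ∀ (nums : List Int), Dom_solution nums → Pre_solution nums → Spec_solution nums (solution nums)

-- ===== LEMMAS AND PROOFS =====

-- the loop body of A's fold over the 35 sums
def stepA (st : List Int × PySem.Set Int) (s : Int) : List Int × PySem.Set Int :=
  if s ∈ st.2 then st
  else (if st.1.length < 5 then heapPush st.1 s else heapPushPop st.1 s, PySem.Set.add st.2 s)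

def sumOf (nums : List Int) (c : List Int) : Int :=
  (c.map (fun e => (PySem.List.pyGet? nums e).getD 0)).sum

-- the 35 sums, in A's (lexicographic) enumeration order
def sumsA (nums : List Int) : List Int :=
  (PySem.List.pyRange 0 7 1).flatMap (fun a =>
    (PySem.List.pyRange (a+1) 7 1).flatMap (fun b =>
      (PySem.List.pyRange (b+1) 7 1).map (fun c => sumOf nums [a, b, c])))

lemma combRec_leaf (nums : List Int) (a b c : Int) (st : List Int × PySem.Set Int) :
    combRec nums 1 7 3 3 [a, b, c] st = stepA st (sumOf nums [a, b, c]) := rfl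

lemma combRec_lvl2 (nums : List Int) (a b c : Int) (st : List Int × PySem.Set Int) :
    combRec nums 2 7 3 2 [a, b, c] st
      = ((PySem.List.pyRange (b+1) 7 1).map (fun i => sumOf nums [a, b, i])).foldl stepA st := by
  show (PySem.List.pyRange (b+1) 7 1).foldl (fun st i => combRec nums 1 7 3 3 [a, b, i] st) st = _
  simp only [combRec_leaf, List.foldl_map]

lemma combRec_lvl1 (nums : List Int) (a b c : Int) (st : List Int × PySem.Set Int) :
    combRec nums 3 7 3 1 [a, b, c] st
      = ((PySem.List.pyRange (a+1) 7 1).flatMap (fun j =>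
          (PySem.List.pyRange (j+1) 7 1).map (fun i => sumOf nums [a, j, i]))).foldl stepA st := by
  show (PySem.List.pyRange (a+1) 7 1).foldl (fun st j => combRec nums 2 7 3 2 [a, j, c] st) st = _
  simp only [combRec_lvl2, List.foldl_flatMap]

lemma combRec_top (nums : List Int) (st : List Int × PySem.Set Int) :
    combRec nums 4 7 3 0 [-1, -1, -1] st = (sumsA nums).foldl stepA st := by
  show (PySem.List.pyRange 0 7 1).foldl (fun st i => combRec nums 3 7 3 1 [i, -1, -1] st) st = _
  simp only [combRec_lvl1, sumsA, List.foldl_flatMap]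

-- A's enumeration produces the same sums list as B's itertools.combinations
lemma sumsA_eq (nums : List Int) :
    sumsA nums = (PySem.List.combinations (PySem.List.pyRange 0 7 1) 3).map
      (fun t => (t.map (fun i => (PySem.List.pyGet? nums i).getD 0)).sum) := rfl


lemma heapPush_perm (h : List Int) (x : Int) : (heapPush h x).Perm (x :: h) := by
  induction h with
  | nil => simp [heapPush]
  | cons a t ih =>
    simp only [heapPush]
    split_ifs with hle
    · exact List.Perm.refl _
    · exact (List.Perm.cons a ih).trans (List.Perm.swap x a t)

lemma mem_heapPush (h : List Int) (x a : Int) : a ∈ heapPush h x ↔ a = x ∨ a ∈ h := by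
  rw [(heapPush_perm h x).mem_iff]; simp

lemma length_heapPush (h : List Int) (x : Int) : (heapPush h x).length = h.length + 1 := by
  rw [(heapPush_perm h x).length_eq]; simp

lemma heapPush_pairwise (h : List Int) (x : Int) (hp : h.Pairwise (· < ·))
    (hx : ∀ b ∈ h, x ≠ b) : (heapPush h x).Pairwise (· < ·) := by
  induction h with
  | nil => simp [heapPush]
  | cons a t ih =>
    rw [List.pairwise_cons] at hp
    simp only [heapPush]
    split_ifs with hle
    · refine List.pairwise_cons.mpr ⟨?_, List.pairwise_cons.mpr hp⟩
      intro b hb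
      rcases List.mem_cons.mp hb with rfl | hb
      · exact lt_of_le_of_ne hle (hx b (List.mem_cons_self))
      · exact lt_of_le_of_lt hle (hp.1 b hb)
    · refine List.pairwise_cons.mpr ⟨?_, ih hp.2 (fun b hb => hx b (List.mem_cons_of_mem _ hb))⟩
      intro b hb
      rcases (mem_heapPush t x b).mp hb with rfl | hb
      · omega
      · exact hp.1 b hb

-- the heap invariant maintained by A's loop: the heap lists, in increasing order,
-- the min(5, |d|) largest elements of the distinct sums d seen so far
def HeapInv (d heap : List Int) : Prop :=
  heap.Pairwise (· < ·) ∧ (∀ a ∈ heap, a ∈ d) ∧ heap.length = min 5 d.length ∧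
  (∀ a ∈ d, a ∉ heap → ∀ b ∈ heap, a < b)

lemma heap_all_mem (d heap : List Int) (hp : heap.Pairwise (· < ·))
    (hsub : ∀ a ∈ heap, a ∈ d) (hlen : d.length ≤ heap.length) : ∀ a ∈ d, a ∈ heap := by
  have hnod : heap.Nodup := hp.imp ne_of_lt
  have hperm : heap.Perm d :=
    (hnod.subperm (fun a ha => hsub a ha)).perm_of_length_le hlen
  intro a ha; exact hperm.mem_iff.mpr ha

lemma stepA_inv (heap : List Int) (d : PySem.Set Int) (x : Int)
    (hnd : d.Nodup) (hinv : HeapInv d heap) :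
    (stepA (heap, d) x).2.Nodup ∧ HeapInv (stepA (heap, d) x).2 (stepA (heap, d) x).1 := by
  obtain ⟨hpw, hsub, hlen, hmax⟩ := hinv
  by_cases hx : x ∈ d
  · simp only [stepA, if_pos hx]
    exact ⟨hnd, hpw, hsub, hlen, hmax⟩
  · have hxh : x ∉ heap := fun h => hx (hsub x h)
    have hnd' : (d ++ [x]).Nodup := by
      simp only [List.nodup_append]
      simp [hnd]
      intro a ha e
      exact hx (e ▸ ha)
    simp only [stepA, if_neg hx, PySem.Set.add_of_not_mem hx]
    refine ⟨hnd', ?_⟩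
    by_cases h5 : heap.length < 5
    · have hall : ∀ a ∈ d, a ∈ heap := heap_all_mem d heap hpw hsub (by omega)
      simp only [if_pos h5]
      refine ⟨heapPush_pairwise heap x hpw (fun b hb e => hxh (e ▸ hb)), ?_, ?_, ?_⟩
      · intro a ha
        rcases (mem_heapPush heap x a).mp ha with rfl | ha
        · simp
        · exact List.mem_append_left _ (hsub a ha)
      · rw [length_heapPush]; simp only [List.length_append, List.length_singleton]; omega
      · intro a ha hna b hb
        exfalso
        rcases List.mem_append.mp ha with ha | ha
        · exact hna ((mem_heapPush heap x a).mpr (Or.inr (hall a ha)))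
        · exact hna ((mem_heapPush heap x a).mpr (Or.inl (List.mem_singleton.mp ha)))
    · simp only [if_neg h5]
      have hd5 : 5 ≤ d.length := by omega
      obtain ⟨m, t, rfl⟩ : ∃ m t, heap = m :: t := by
        cases heap with
        | nil => simp at h5
        | cons m t => exact ⟨m, t, rfl⟩
      have hmt : ∀ b ∈ t, m < b := (List.pairwise_cons.mp hpw).1
      have hpwt : t.Pairwise (· < ·) := (List.pairwise_cons.mp hpw).2
      simp only [heapPushPop]
      split_ifs with hmx
      · -- m < x : the old minimum m leaves, x enters
        refine ⟨heapPush_pairwise t x hpwt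
            (fun b hb e => hxh (e ▸ List.mem_cons_of_mem _ hb)), ?_, ?_, ?_⟩
        · intro a ha
          rcases (mem_heapPush t x a).mp ha with rfl | ha
          · simp
          · exact List.mem_append_left _ (hsub a (List.mem_cons_of_mem _ ha))
        · rw [length_heapPush]
          simp only [List.length_cons] at hlen
          simp only [List.length_append, List.length_singleton]; omega
        · intro a ha hna b hb
          rcases List.mem_append.mp ha with ha | ha
          · rcases (mem_heapPush t x b).mp hb with he | hb
            · by_cases ham : a = m
              · rw [he, ham]; exact hmx
              · have : a ∉ m :: t := by
                  intro hmem
                  rcases List.mem_cons.mp hmem with h | h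
                  · exact ham h
                  · exact hna ((mem_heapPush t x a).mpr (Or.inr h))
                rw [he]
                exact lt_trans (hmax a ha this m (List.mem_cons_self)) hmx
            · by_cases ham : a = m
              · exact ham ▸ hmt b hb
              · have : a ∉ m :: t := by
                  intro hmem
                  rcases List.mem_cons.mp hmem with h | h
                  · exact ham h
                  · exact hna ((mem_heapPush t x a).mpr (Or.inr h))
                exact hmax a ha this b (List.mem_cons_of_mem _ hb)
          · exact absurd ((mem_heapPush t x a).mpr (Or.inl (List.mem_singleton.mp ha))) hna
      · -- x ≤ m : x is ignored (smaller than everything kept)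
        have hxm : x < m :=
          lt_of_le_of_ne (by omega) (fun e => hxh (e ▸ List.mem_cons_self))
        refine ⟨hpw, ?_, ?_, ?_⟩
        · exact fun a ha => List.mem_append_left _ (hsub a ha)
        · simp only [List.length_append, List.length_singleton]
          simp only [List.length_cons] at hlen ⊢; omega
        · intro a ha hna b hb
          rcases List.mem_append.mp ha with ha | ha
          · exact hmax a ha hna b hb
          · rcases List.mem_singleton.mp ha with rfl
            rcases List.mem_cons.mp hb with rfl | hb
            · exact hxm
            · exact lt_trans hxm (hmt b hb)

lemma fold_inv (xs : List Int) : ∀ (st : List Int × PySem.Set Int), st.2.Nodup → HeapInv st.2 st.1 →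
    (xs.foldl stepA st).2.Nodup ∧ HeapInv (xs.foldl stepA st).2 (xs.foldl stepA st).1 := by
  induction xs with
  | nil => exact fun st h1 h2 => ⟨h1, h2⟩
  | cons x xs ih =>
    intro st h1 h2
    rw [List.foldl_cons]
    exact ih _ (stepA_inv st.1 st.2 x h1 h2).1 (stepA_inv st.1 st.2 x h1 h2).2

lemma stepA_snd (st : List Int × PySem.Set Int) (x : Int) :
    (stepA st x).2 = PySem.Set.add st.2 x := by
  unfold stepA
  split_ifs with h h2
  · exact (PySem.Set.add_of_mem h).symm
  · rfl
  · rfl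

lemma fold_snd (xs : List Int) : ∀ (st : List Int × PySem.Set Int),
    (xs.foldl stepA st).2 = xs.foldl PySem.Set.add st.2 := by
  induction xs with
  | nil => exact fun _ => rfl
  | cons x xs ih =>
    intro st
    rw [List.foldl_cons, List.foldl_cons, ih, stepA_snd]

lemma pyGetD_neg_one (xs : List Int) (h : xs ≠ []) (d : Int) :
    PySem.List.pyGetD xs (-1) d = xs[xs.length - 1]'(Nat.sub_lt (List.length_pos_iff.mpr h) one_pos) := by
  have hl : 1 ≤ xs.length := List.length_pos_iff.mpr h
  simp only [PySem.List.pyGetD, PySem.List.pyGet?, PySem.List.pyIdx?]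
  rw [if_neg (by omega), if_pos (by omega)]
  simp only [Option.bind_some]
  rw [List.getElem?_eq_getElem (by omega)]
  rfl

-- the heap's minimum is B's answer: the 5th-largest distinct sum, or the smallest
-- when there are fewer than 5 distinct sums
lemma heap_head_eq (d heap : List Int) (hd : d.Nodup) (hne : d ≠ []) (hinv : HeapInv d heap) :
    (PySem.List.pyGet? heap 0).getD 0 =
      (if 5 ≤ (PySem.List.sorted d (fun x => x) true).length
       then (PySem.List.pyGet? (PySem.List.sorted d (fun x => x) true) 4).getD 0
       else (PySem.List.pyGet? (PySem.List.sorted d (fun x => x) true) (-1)).getD 0) := by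
  obtain ⟨hpw, hsub, hlen, hmax⟩ := hinv
  have hdpos : 0 < d.length := List.length_pos_iff.mpr hne
  have hhpos : 0 < heap.length := by omega
  have hrestperm : (PySem.List.sorted (d.filter (fun a => !decide (a ∈ heap))) (fun x => x) true).Perm
      (d.filter (fun a => !decide (a ∈ heap))) := PySem.List.sorted_perm _ _ _
  set rest := PySem.List.sorted (d.filter (fun a => !decide (a ∈ heap))) (fun x => x) true with hrest
  have hheapnd : heap.Nodup := hpw.imp ne_of_lt
  have hperm1 : heap.Perm (d.filter (fun a => decide (a ∈ heap))) := by
    refine (hheapnd.subperm ?_).perm_of_length_le ?_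
    · intro a ha
      exact List.mem_filter.mpr ⟨hsub a ha, by simp [ha]⟩
    · refine List.Subperm.length_le ((hd.filter _).subperm ?_)
      intro a ha
      have := List.mem_filter.mp ha
      simpa using this.2
  have hperm : (heap.reverse ++ rest).Perm d := by
    refine List.Perm.trans (List.Perm.append ((heap.reverse_perm).trans hperm1) hrestperm) ?_
    exact List.filter_append_perm _ d
  have hpair : (heap.reverse ++ rest).Pairwise (fun a b => b < a) := by
    rw [List.pairwise_append]
    refine ⟨List.pairwise_reverse.mpr hpw, ?_, ?_⟩
    · have h1 : rest.Pairwise (fun a b => b ≤ a) := PySem.List.sorted_pairwise_rev _ _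
      have h2 : rest.Nodup := hrestperm.nodup_iff.mpr (hd.filter _)
      exact (h1.and h2).imp (fun h => lt_of_le_of_ne h.1 (Ne.symm h.2))
    · intro a ha b hb
      have hbf := List.mem_filter.mp (hrestperm.mem_iff.mp hb)
      have hbh : b ∉ heap := by simpa using hbf.2
      exact hmax b hbf.1 hbh a (List.mem_reverse.mp ha)
  have hdesc : PySem.List.sorted d (fun x => x) true = heap.reverse ++ rest :=
    PySem.List.sorted_rev_eq_of_perm_of_pairwise_gt d _ _ hperm hpair
  have hdlen : (PySem.List.sorted d (fun x => x) true).length = d.length :=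
    PySem.List.length_sorted d _ true
  have hgetD : ∀ (xs : List Int) (i : Int), (PySem.List.pyGet? xs i).getD 0 = PySem.List.pyGetD xs i 0 :=
    fun _ _ => rfl
  rw [hgetD, hgetD, hgetD]
  by_cases hc : 5 ≤ d.length
  · have h5 : heap.length = 5 := by omega
    rw [if_pos (by omega)]
    rw [PySem.List.pyGetD_eq_getElem heap 0 (by omega) (by exact_mod_cast hhpos)]
    rw [PySem.List.pyGetD_eq_getElem _ 0 (by omega) (by rw [hdlen]; exact_mod_cast hc)]
    have h4 : (4 : Int).toNat < heap.reverse.length := by simp [h5]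
    simp only [hdesc]
    rw [List.getElem_append_left (by simpa using h4), List.getElem_reverse]
    congr 1
    simp [h5]
  · have h5 : heap.length = d.length := by omega
    have hallmem : ∀ a ∈ d, a ∈ heap := heap_all_mem d heap hpw hsub (by omega)
    have hfilnil : d.filter (fun a => !decide (a ∈ heap)) = [] := by
      rw [List.filter_eq_nil_iff]
      intro a ha
      simp [hallmem a ha]
    have hdesc' : PySem.List.sorted d (fun x => x) true = heap.reverse := by
      rw [hdesc, hrest, hfilnil]
      simp [PySem.List.sorted]
    rw [if_neg (by omega)]
    have hdne : PySem.List.sorted d (fun x => x) true ≠ [] := by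
      rw [hdesc']
      simp [← List.length_pos_iff, hhpos]
    rw [PySem.List.pyGetD_eq_getElem heap 0 (by omega) (by exact_mod_cast hhpos)]
    rw [pyGetD_neg_one _ hdne]
    simp only [hdesc']
    rw [List.getElem_reverse]
    congr 1
    simp only [List.length_reverse]
    omega

lemma sumsA_ne_nil (nums : List Int) : sumsA nums ≠ [] := by
  rw [sumsA_eq, Ne, List.map_eq_nil_iff]
  decide

-- ===== VERDICT (by name: the statement is the Claim_ definition above) =====
theorem solution_spec : Claim_equal_solution := by
  unfold Claim_equal_solution Spec_solution
  intro nums _ _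
  unfold solution solution_alt
  rw [combRec_top, ← sumsA_eq]
  set F := (sumsA nums).foldl stepA ([], PySem.Set.empty) with hF
  have hsnd : F.2 = PySem.Set.ofList (sumsA nums) := by
    rw [hF, fold_snd, PySem.Set.ofList_eq_foldl]
    rfl
  have hinv := fold_inv (sumsA nums) ([], PySem.Set.empty) (by simp [PySem.Set.empty])
    ⟨List.Pairwise.nil, by simp, by simp [PySem.Set.empty], by simp [PySem.Set.empty]⟩
  rw [← hF] at hinv
  rw [hsnd] at hinv
  have hne : PySem.Set.ofList (sumsA nums) ≠ [] := by
    obtain ⟨a, ha⟩ := List.exists_mem_of_ne_nil _ (sumsA_ne_nil nums)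
    intro h
    have := (PySem.Set.mem_ofList (sumsA nums) a).mpr ha
    rw [h] at this
    exact List.not_mem_nil this
  exact heap_head_eq _ _ (PySem.Set.nodup_ofList _) hne hinv.2
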